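-- pv_equiv track=rewrite | github.com/Ex-libris/sxm_viewer | sxm_viewer/gui/main_window.py | _find_channel_index_for_spec
-- ===== SOURCE A (Python) =====
-- def _find_channel_index_for_spec(fds, spec):
--     """Given the list of file descriptors for a file and a spec dict
--     {'caption': str, 'index': int, ...}, return the best matching channel index.
--     Prefers exact caption match (case-insensitive), then substring match, then stored index.
--     Returns None if no suitable channel is found.
--     """
--     if not fds:
--         return None
--     target_cap = (spec.get('caption') or '').strip().lower()
--     if target_cap:
--         # exact caption match
--         for i, fd in enumerate(fds):
--             cap_i = (fd.get('Caption','') or '').strip().lower()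
--             if cap_i == target_cap:
--                 return i
--         # substring caption match
--         for i, fd in enumerate(fds):
--             cap_i = (fd.get('Caption','') or '').strip().lower()
--             if target_cap in cap_i and cap_i:
--                 return i
--         # try FileName match if caption didn't work
--         for i, fd in enumerate(fds):
--             fn_i = (fd.get('FileName','') or '').strip().lower()
--             if fn_i == target_cap or (target_cap and target_cap in fn_i):
--                 return i
--     # fallback to stored index
--     try:
--         idx = int(spec.get('index', -1))
--     except Exception:
--         idx = -1
--     if 0 <= idx < len(fds):
--         return idx
--     return None
-- ===== SOURCE B (Python) =====
-- def _find_channel_index_for_spec(fds, spec):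
--     target = (spec.get('caption') or '').strip().lower()
--     first_exact = first_sub = first_fn = None
--     if target:
--         for i, fd in enumerate(fds):
--             cap = (fd.get('Caption', '') or '').strip().lower()
--             fn = (fd.get('FileName', '') or '').strip().lower()
--             if first_exact is None and cap == target:
--                 first_exact = i
--             if first_sub is None and target in cap:
--                 first_sub = i
--             if first_fn is None and target in fn:
--                 first_fn = i
--         best = first_exact if first_exact is not None else (
--             first_sub if first_sub is not None else first_fn)
--         if best is not None:
--             return best
--     try:
--         idx = int(spec.get('index', -1))
--     except Exception:
--         idx = -1
--     return idx if 0 <= idx < len(fds) else None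
-- ===== Notes on version B (the rewrite author's own statement) =====
-- stated objective: simpler
-- what changed: Replaces A's three sequential full scans of fds (exact caption, substring caption, filename) by one single pass that records the first index hitting each priority tier, then picks the best tier; fallback to the stored index is unchanged.
import Mathlib
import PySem

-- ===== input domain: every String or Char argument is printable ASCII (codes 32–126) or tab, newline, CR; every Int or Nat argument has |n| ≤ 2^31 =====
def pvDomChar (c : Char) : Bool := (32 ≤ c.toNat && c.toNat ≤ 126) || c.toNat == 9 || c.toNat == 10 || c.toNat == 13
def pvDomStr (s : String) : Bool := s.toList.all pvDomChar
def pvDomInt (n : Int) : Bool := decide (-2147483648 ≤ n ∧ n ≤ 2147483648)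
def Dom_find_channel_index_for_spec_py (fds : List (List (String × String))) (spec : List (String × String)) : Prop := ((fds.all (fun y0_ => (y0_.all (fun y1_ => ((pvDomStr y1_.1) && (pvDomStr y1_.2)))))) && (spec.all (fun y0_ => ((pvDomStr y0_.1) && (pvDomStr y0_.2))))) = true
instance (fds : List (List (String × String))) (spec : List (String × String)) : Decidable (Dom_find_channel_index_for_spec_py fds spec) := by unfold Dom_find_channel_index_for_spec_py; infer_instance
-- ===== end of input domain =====

-- B replaces A's three sequential scans of fds by a single pass recording the first index of
-- each priority tier (exact caption, substring caption, filename substring); objective: simpler.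

-- shared helpers: dict.get (first match) and the common Python idiom "(x or '').strip().lower()"
def pvGet (d : List (String × String)) (k : String) : Option String :=
  (d.find? (fun p => p.1 == k)).map (·.2)

def pvNorm (o : Option String) : List Char :=
  PySem.Chars.lower (PySem.Chars.strip (o.getD "").toList)

-- "try: idx = int(spec.get('index', -1)) except: idx = -1" (both Pythons contain this line verbatim)
def pvIdxOf (spec : List (String × String)) : Int :=
  match pvGet spec "index" with
  | none => -1
  | some s => (PySem.Int.ofStr? s).getD (-1)

-- ===== PORT A =====
-- "for i, fd in enumerate(fds): if cap_i == target: return i"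
def pvLoopExact (t : List Char) : List (List (String × String)) → Int → Option Int
  | [], _ => none
  | fd :: rest, i =>
      if pvNorm (pvGet fd "Caption") = t then some i else pvLoopExact t rest (i + 1)

-- "if target_cap in cap_i and cap_i: return i"
def pvLoopSub (t : List Char) : List (List (String × String)) → Int → Option Int
  | [], _ => none
  | fd :: rest, i =>
      if PySem.Chars.isIn t (pvNorm (pvGet fd "Caption")) = true ∧ pvNorm (pvGet fd "Caption") ≠ []
      then some i else pvLoopSub t rest (i + 1)

-- "if fn_i == target_cap or (target_cap and target_cap in fn_i): return i"
def pvLoopFn (t : List Char) : List (List (String × String)) → Int → Option Int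
  | [], _ => none
  | fd :: rest, i =>
      if pvNorm (pvGet fd "FileName") = t ∨ (t ≠ [] ∧ PySem.Chars.isIn t (pvNorm (pvGet fd "FileName")) = true)
      then some i else pvLoopFn t rest (i + 1)

def find_channel_index_for_spec_py (fds : List (List (String × String))) (spec : List (String × String)) : Option Int :=
  if fds = [] then none
  else
    let t := pvNorm (pvGet spec "caption")
    match (if t ≠ [] then Option.or (pvLoopExact t fds 0) (Option.or (pvLoopSub t fds 0) (pvLoopFn t fds 0)) else none) with
    | some i => some i
    | none =>
        let idx := pvIdxOf spec
        if 0 ≤ idx ∧ idx < (fds.length : Int) then some idx else none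

-- ===== PORT B =====
-- one pass: record the first index reaching each tier ("None-guarded" updates)
def pvScan (t : List Char) : List (List (String × String)) → Int →
    Option Int → Option Int → Option Int → Option Int × Option Int × Option Int
  | [], _, e, s, f => (e, s, f)
  | fd :: rest, i, e, s, f =>
      let cap := pvNorm (pvGet fd "Caption")
      let fn := pvNorm (pvGet fd "FileName")
      pvScan t rest (i + 1)
        (if e = none ∧ cap = t then some i else e)
        (if s = none ∧ PySem.Chars.isIn t cap = true then some i else s)
        (if f = none ∧ PySem.Chars.isIn t fn = true then some i else f)

def find_channel_index_for_spec_py_alt (fds : List (List (String × String))) (spec : List (String × String)) : Option Int :=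
  let t := pvNorm (pvGet spec "caption")
  let best : Option Int :=
    if t ≠ [] then
      let r := pvScan t fds 0 none none none
      Option.or r.1 (Option.or r.2.1 r.2.2)
    else none
  match best with
  | some i => some i
  | none =>
      let idx := pvIdxOf spec
      if 0 ≤ idx ∧ idx < (fds.length : Int) then some idx else none

-- ===== PRECONDITION & SPEC =====
def Spec_find_channel_index_for_spec_py (fds : List (List (String × String))) (spec : List (String × String)) (out : Option Int) : Prop := out = find_channel_index_for_spec_py_alt fds spec
instance (fds : List (List (String × String))) (spec : List (String × String)) (out : Option Int) : Decidable (Spec_find_channel_index_for_spec_py fds spec out) := by unfold Spec_find_channel_index_for_spec_py; infer_instance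

-- ===== CLAIM (what is proved, stated in full; the proofs are below) =====
def Claim_equal_find_channel_index_for_spec_py : Prop := ∀ (fds : List (List (String × String))) (spec : List (String × String)), Dom_find_channel_index_for_spec_py fds spec → Spec_find_channel_index_for_spec_py fds spec (find_channel_index_for_spec_py fds spec)

-- ===== LEMMAS AND PROOFS =====

-- single-condition scans matching B's three tier conditions (Sub/Fn use the bare `isIn` test)
def pvLoopSubB (t : List Char) : List (List (String × String)) → Int → Option Int
  | [], _ => none
  | fd :: rest, i =>
      if PySem.Chars.isIn t (pvNorm (pvGet fd "Caption")) = true then some i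
      else pvLoopSubB t rest (i + 1)

def pvLoopFnB (t : List Char) : List (List (String × String)) → Int → Option Int
  | [], _ => none
  | fd :: rest, i =>
      if PySem.Chars.isIn t (pvNorm (pvGet fd "FileName")) = true then some i
      else pvLoopFnB t rest (i + 1)

-- the one-pass scan computes the three first-hit loops, each behind its frozen accumulator
theorem pvScan_eq (t : List Char) (fds : List (List (String × String))) (i : Int)
    (e s f : Option Int) :
    pvScan t fds i e s f =
      (Option.or e (pvLoopExact t fds i),
       Option.or s (pvLoopSubB t fds i),
       Option.or f (pvLoopFnB t fds i)) := by
  induction fds generalizing i e s f with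
  | nil => simp [pvScan, pvLoopExact, pvLoopSubB, pvLoopFnB]
  | cons fd rest ih =>
      simp only [pvScan, pvLoopExact, pvLoopSubB, pvLoopFnB]
      rw [ih]
      by_cases h1 : pvNorm (pvGet fd "Caption") = t <;>
        by_cases h2 : PySem.Chars.isIn t (pvNorm (pvGet fd "Caption")) = true <;>
          by_cases h3 : PySem.Chars.isIn t (pvNorm (pvGet fd "FileName")) = true <;>
            cases e <;> cases s <;> cases f <;> simp [h1, h2, h3] <;>
              (try (by_cases h4 : PySem.Chars.isIn t t = true <;> simp [h4]))

-- with a nonempty target, the bare `isIn` test equals A's "target in cap and cap" test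
theorem pvLoopSubB_eq (t : List Char) (ht : t ≠ []) (fds : List (List (String × String))) (i : Int) :
    pvLoopSubB t fds i = pvLoopSub t fds i := by
  induction fds generalizing i with
  | nil => simp [pvLoopSubB, pvLoopSub]
  | cons fd rest ih =>
      simp only [pvLoopSubB, pvLoopSub]
      have hsub : (PySem.Chars.isIn t (pvNorm (pvGet fd "Caption")) = true ∧ pvNorm (pvGet fd "Caption") ≠ [])
          ↔ PySem.Chars.isIn t (pvNorm (pvGet fd "Caption")) = true := by
        constructor
        · exact fun h => h.1
        · intro hi
          refine ⟨hi, fun hnil => ?_⟩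
          rcases (PySem.Chars.isIn_iff_infix ..).1 hi with ⟨a, b, hab⟩
          rw [hnil] at hab
          simp [List.append_eq_nil_iff] at hab
          exact ht hab.2.1
      rw [if_congr hsub rfl rfl, ih]

-- with a nonempty target, the bare `isIn` test equals A's "fn == target or target in fn" test
theorem pvLoopFnB_eq (t : List Char) (ht : t ≠ []) (fds : List (List (String × String))) (i : Int) :
    pvLoopFnB t fds i = pvLoopFn t fds i := by
  induction fds generalizing i with
  | nil => simp [pvLoopFnB, pvLoopFn]
  | cons fd rest ih =>
      simp only [pvLoopFnB, pvLoopFn]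
      have hfn : (PySem.Chars.isIn t (pvNorm (pvGet fd "FileName")) = true)
          ↔ (pvNorm (pvGet fd "FileName") = t ∨ (t ≠ [] ∧ PySem.Chars.isIn t (pvNorm (pvGet fd "FileName")) = true)) := by
        constructor
        · exact fun hi => Or.inr ⟨ht, hi⟩
        · rintro (rfl | ⟨_, hi⟩)
          · exact (PySem.Chars.isIn_iff_infix ..).2 (List.infix_refl _)
          · exact hi
      rw [if_congr hfn rfl rfl, ih]

-- ===== VERDICT (by name: the statement is the Claim_ definition above) =====
theorem find_channel_index_for_spec_py_spec : Claim_equal_find_channel_index_for_spec_py := by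
  intro fds spec _
  unfold Spec_find_channel_index_for_spec_py
  unfold find_channel_index_for_spec_py find_channel_index_for_spec_py_alt
  by_cases hfds : fds = []
  · subst hfds
    by_cases ht : pvNorm (pvGet spec "caption") ≠ [] <;> simp [ht, pvScan]
  · simp only [if_neg hfds]
    by_cases ht : pvNorm (pvGet spec "caption") ≠ []
    · rw [if_pos ht, if_pos ht, pvScan_eq, pvLoopSubB_eq _ ht, pvLoopFnB_eq _ ht]
      simp
    · simp [ht]
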